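-- pv_equiv track=rewrite | github.com/omelancon/ComPyl | compyl/__lexer/interval_operations.py | get_minimal_covering_intervals
-- ===== SOURCE A (Python) =====
-- from functools import cmp_to_key
--
-- def interval_cmp(x, y):
--     """
--     Dictionary order comparator for intervals
--     """
--     if x[0] > y[0]:
--         return 1
--     elif x[0] < y[0]:
--         return -1
--     elif x[1] > y[1]:
--         return 1
--     elif x[1] < y[1]:
--         return -1
--     else:
--         return 0
--
-- def get_minimal_covering_intervals(intervals):
--     """
--     Given a list of intervals (min_int, max_int) which might overlap, return a minimal covering set of intervals
--     The Minimal Covering Set of Interval (MCSI) is the set of intervals that has the following properties: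
--
--     1) The MCSI forms a disjoint partition of the union of the initial set
--        i.e. they represent the same overall values, but the MSCI doesn't allow overlaps anymore
--
--     2) For each interval A in MCSI and each interval B in the initial set of intervals, then either
--        i) A is a proper subset of B (A and B = A)
--        ii) or A and B are disjoint
--
--     3) The MCSI is the smallest set such that the two above rules are respected
--        It doesn't mean it is unique, solely that any other such set has the same cardinality
--
--     Ex: Given the set {(1,5), (3, 7), (9,34), (15,15)}, we would return
--         {(1,2), (3,5), (6,7), (8,14), (15, 15), (16, 34)}
--
--     This is a way here to partition the intervals of ascii values in the lookouts of an FDA to get the lookout values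
--     of a DFA
--     """
--
--     def rec(intervals):
--         if not intervals:
--             return []
--
--         if len(intervals) == 1:
--             return intervals
--
--         intervals.sort(key=cmp_to_key(interval_cmp))
--
--         left = intervals[0][0]
--         right = intervals[0][1]
--
--         for el in intervals:
--             if el[0] == left:
--                 continue
--             elif el[0] <= right:
--                 right = el[0] - 1
--                 break
--             else:
--                 break
--
--         # Remove intervals below (right + 1) and truncate others such that their minimum > max
--         truncated_intervals = [(right + 1, el[1]) if el[0] <= right else el for el in intervals if el[1] > right]
--
--         return [(left, right)] + rec(truncated_intervals)
--
--     return rec(intervals)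
-- ===== SOURCE B (Python) =====
-- def get_minimal_covering_intervals(intervals):
--     # Sort once, then sweep left-to-right. "carry" holds the end points of
--     # intervals truncated by the previous emitted segment (their implicit start
--     # is floor = prev_right + 1, the minimum among all remaining starts).
--     # Entries whose end is <= the last emitted right are dead; they are skipped
--     # lazily (emitted rights are strictly increasing, so one threshold suffices).
--     ivs = sorted(intervals)
--     out = []
--     i = 0
--     n = len(ivs)
--     carry = []          # ascending ends, shared implicit start = carry_start
--     carry_start = 0
--     prev_right = None   # None = nothing emitted yet (no entry is dead)
--     while True:
--         # skip dead entries at the front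
--         while i < n and prev_right is not None and ivs[i][1] <= prev_right:
--             i += 1
--         if not carry and i == n:
--             return out
--         # left = minimal remaining start; e0 = minimal end among that start group
--         if carry:
--             left = carry_start
--             e0 = carry[0]
--             if i < n and ivs[i][0] == left and ivs[i][1] < e0:
--                 e0 = ivs[i][1]
--         else:
--             left = ivs[i][0]
--             e0 = ivs[i][1]
--         # consume the whole start group from the suffix, collecting its ends
--         group_ends = []
--         j = i
--         while j < n and ivs[j][0] == left:
--             if prev_right is None or ivs[j][1] > prev_right:
--                 group_ends.append(ivs[j][1])
--             j += 1
--         # cut at the next alive distinct start, if it lies inside [left, e0]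
--         right = e0
--         k = j
--         while k < n and prev_right is not None and ivs[k][1] <= prev_right:
--             k += 1
--         if k < n and ivs[k][0] <= right:
--             right = ivs[k][0] - 1
--         out.append((left, right))
--         # survivors of the group (end > right) become the new carry
--         old = carry
--         carry = []
--         a = b = 0
--         while a < len(old) and old[a] <= right:
--             a += 1
--         while b < len(group_ends) and group_ends[b] <= right:
--             b += 1
--         while a < len(old) or b < len(group_ends):
--             if b >= len(group_ends) or (a < len(old) and old[a] <= group_ends[b]):
--                 carry.append(old[a]); a += 1
--             else:
--                 carry.append(group_ends[b]); b += 1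
--         carry_start = left if left > right else right + 1
--         i = j
--         prev_right = right
-- ===== Notes on version B (the rewrite author's own statement) =====
-- stated objective: faster
-- what changed: replaces A's sort-per-emitted-segment recursion by one initial sort followed by a single forward sweep that keeps the truncated survivors' ends in a sorted carry list and skips dropped intervals lazily
import Mathlib
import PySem

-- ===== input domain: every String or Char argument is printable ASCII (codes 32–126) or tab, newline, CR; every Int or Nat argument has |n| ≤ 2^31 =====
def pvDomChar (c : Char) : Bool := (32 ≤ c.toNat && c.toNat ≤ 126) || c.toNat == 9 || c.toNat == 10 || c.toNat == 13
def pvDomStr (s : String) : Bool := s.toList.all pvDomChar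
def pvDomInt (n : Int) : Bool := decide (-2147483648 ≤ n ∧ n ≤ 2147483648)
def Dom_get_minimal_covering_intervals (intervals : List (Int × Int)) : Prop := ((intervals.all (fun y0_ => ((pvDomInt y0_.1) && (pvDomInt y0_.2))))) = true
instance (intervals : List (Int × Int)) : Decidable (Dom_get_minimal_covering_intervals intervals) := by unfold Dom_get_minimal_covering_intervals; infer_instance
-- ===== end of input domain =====

-- B replaces A's sort-per-emitted-segment recursion by one initial sort plus a single
-- forward sweep (carry list of truncated ends, lazy dead-skipping); equivalence is about
-- the return value only (A sorts its argument list in place, B does not mutate it).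
-- ===== PORT A =====
-- comparator lex order on pairs (Python interval_cmp under cmp_to_key; .sort ported as List.mergeSort)
def pvLexLe (p q : Int × Int) : Bool := p.1 < q.1 || (p.1 == q.1 && p.2 ≤ q.2)

-- fuel bound making A's recursion structural (never exhausted; proved sufficient below)
def pvSpan (l : List (Int × Int)) : Nat := (l.map (fun p => (p.2 + 1 - p.1).toNat)).sum

def pvFuel (l : List (Int × Int)) : Nat := pvSpan l + l.length + 1

-- the for-loop of A computing `right` (continue / break structure kept)
def pvScan (left right : Int) : List (Int × Int) → Int
  | [] => right
  | el :: t => if el.1 = left then pvScan left right t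
               else if el.1 ≤ right then el.1 - 1 else right

-- A's inner `rec`
def pvRecA : Nat → List (Int × Int) → List (Int × Int)
  | 0, _ => []
  | fuel+1, l =>
    if l = [] then []
    else if l.length = 1 then l
    else
      match l.mergeSort pvLexLe with
      | [] => []
      | (left, e0) :: t =>
        let s := (left, e0) :: t
        let right := pvScan left e0 s
        let trunc := (s.filter (fun el => right < el.2)).map
          (fun el => if el.1 ≤ right then (right + 1, el.2) else el)
        (left, right) :: pvRecA fuel trunc

def get_minimal_covering_intervals (intervals : List (Int × Int)) : List (Int × Int) :=
  pvRecA (pvFuel intervals) intervals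

-- entry dead = end <= last emitted right (Source B's lazy-deletion test)
def pvDead (pr : Option Int) (p : Int × Int) : Bool :=
  match pr with
  | none => false
  | some r => p.2 ≤ r

-- Source B's front dead-skip while-loop
def pvSkipDead (pr : Option Int) : List (Int × Int) → List (Int × Int)
  | [] => []
  | p :: t => if pvDead pr p then pvSkipDead pr t else p :: t

-- Source B's drop-while(end <= right) loops on the two carry sources
def pvDropLe (r : Int) : List Int → List Int
  | [] => []
  | e :: t => if e ≤ r then pvDropLe r t else e :: t

-- Source B's merge loop of the two ascending end lists
def pvMerge : List Int → List Int → List Int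
  | [], ys => ys
  | x :: xs, [] => x :: xs
  | x :: xs, y :: ys => if x ≤ y then x :: pvMerge xs (y :: ys) else y :: pvMerge (x :: xs) ys
termination_by xs ys => xs.length + ys.length

-- Source B's main while-loop; the forward index i is the consumed suffix
def pvLoop : Nat → List (Int × Int) → List Int → Int → Option Int → List (Int × Int)
  | 0, _, _, _, _ => []
  | fuel+1, suffix, carry, cs, pr =>
    let suf := pvSkipDead pr suffix
    match carry, suf with
    | [], [] => []
    | c, s =>
      let lp : Int × Int :=
        match c, s with
        | c0 :: _, (a, b) :: _ => if a = cs ∧ b < c0 then (cs, b) else (cs, c0)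
        | c0 :: _, [] => (cs, c0)
        | [], s0 :: _ => s0
        | [], [] => (0, 0)    -- unreachable (outer match)
      let left := lp.1
      let e0 := lp.2
      let groupEnds := ((s.takeWhile (fun p => p.1 == left)).filter
        (fun p => !pvDead pr p)).map (fun p => p.2)
      let rest := s.dropWhile (fun p => p.1 == left)
      let right :=
        match pvSkipDead pr rest with
        | [] => e0
        | (a, _) :: _ => if a ≤ e0 then a - 1 else e0
      let carry' := pvMerge (pvDropLe right c) (pvDropLe right groupEnds)
      let cs' := if right < left then left else right + 1
      (left, right) :: pvLoop fuel rest carry' cs' (some right)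

def get_minimal_covering_intervals_alt (intervals : List (Int × Int)) : List (Int × Int) :=
  pvLoop (pvFuel intervals) (intervals.mergeSort pvLexLe) [] 0 none

-- ===== PRECONDITION & SPEC =====
def Spec_get_minimal_covering_intervals (intervals : List (Int × Int)) (out : List (Int × Int)) : Prop := out = get_minimal_covering_intervals_alt intervals
instance (intervals : List (Int × Int)) (out : List (Int × Int)) : Decidable (Spec_get_minimal_covering_intervals intervals out) := by unfold Spec_get_minimal_covering_intervals; infer_instance

-- ===== CLAIM (what is proved, stated in full; the proofs are below) =====
def Claim_equal_get_minimal_covering_intervals : Prop := ∀ (intervals : List (Int × Int)), Dom_get_minimal_covering_intervals intervals → Spec_get_minimal_covering_intervals intervals (get_minimal_covering_intervals intervals)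

-- ===== LEMMAS AND PROOFS =====

-- Propositional form of the lexicographic comparator
def LexLe (p q : Int × Int) : Prop := p.1 < q.1 ∨ (p.1 = q.1 ∧ p.2 ≤ q.2)

theorem pvLexLe_iff (p q : Int × Int) : pvLexLe p q = true ↔ LexLe p q := by
  simp [pvLexLe, LexLe]

theorem lexle_trans {p q r : Int × Int} (h1 : LexLe p q) (h2 : LexLe q r) : LexLe p r := by
  rcases h1 with h1 | ⟨e1, h1⟩ <;> rcases h2 with h2 | ⟨e2, h2⟩ <;>
    [exact Or.inl (lt_trans h1 h2); exact Or.inl (e2 ▸ h1);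
     exact Or.inl (e1 ▸ h2); exact Or.inr ⟨e1.trans e2, le_trans h1 h2⟩]

theorem lexle_total (p q : Int × Int) : LexLe p q ∨ LexLe q p := by
  rcases lt_trichotomy p.1 q.1 with h | h | h
  · exact Or.inl (Or.inl h)
  · rcases le_total p.2 q.2 with h2 | h2
    · exact Or.inl (Or.inr ⟨h, h2⟩)
    · exact Or.inr (Or.inr ⟨h.symm, h2⟩)
  · exact Or.inr (Or.inl h)

theorem lexle_antisymm {p q : Int × Int} (h1 : LexLe p q) (h2 : LexLe q p) : p = q := by
  rcases h1 with h1 | ⟨e1, h1⟩ <;> rcases h2 with h2 | ⟨e2, h2⟩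
  · exact absurd h2 (not_lt.mpr (le_of_lt h1))
  · exact absurd h1 (not_lt.mpr (le_of_eq e2))
  · exact absurd h2 (not_lt.mpr (le_of_eq e1))
  · exact Prod.ext e1 (le_antisymm h1 h2)

theorem perm_sorted_eq {l₁ l₂ : List (Int × Int)} (hp : l₁.Perm l₂)
    (s₁ : l₁.Pairwise LexLe) (s₂ : l₂.Pairwise LexLe) : l₁ = l₂ :=
  hp.eq_of_pairwise (fun _ _ _ _ h1 h2 => lexle_antisymm h1 h2) s₁ s₂

theorem sort_pairwise (l : List (Int × Int)) : (l.mergeSort pvLexLe).Pairwise LexLe := by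
  have := List.pairwise_mergeSort
    (le := pvLexLe)
    (fun a b c h1 h2 => (pvLexLe_iff a c).mpr
      (lexle_trans ((pvLexLe_iff a b).mp h1) ((pvLexLe_iff b c).mp h2)))
    (fun a b => by
      rcases lexle_total a b with h | h
      · simp [(pvLexLe_iff a b).mpr h]
      · simp [(pvLexLe_iff b a).mpr h]) l
  exact this.imp (fun h => (pvLexLe_iff _ _).mp h)

theorem sort_eq {l S : List (Int × Int)} (hp : l.Perm S) (hS : S.Pairwise LexLe) :
    l.mergeSort pvLexLe = S :=
  perm_sorted_eq ((l.mergeSort_perm pvLexLe).trans hp) (sort_pairwise l) hS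

-- ascending lists of Int
theorem perm_asc_eq {l₁ l₂ : List Int} (hp : l₁.Perm l₂)
    (s₁ : l₁.Pairwise (· ≤ ·)) (s₂ : l₂.Pairwise (· ≤ ·)) : l₁ = l₂ :=
  hp.eq_of_pairwise (fun _ _ _ _ h1 h2 => le_antisymm h1 h2) s₁ s₂

theorem pvMerge_perm (xs ys : List Int) : (pvMerge xs ys).Perm (xs ++ ys) := by
  induction xs, ys using pvMerge.induct with
  | case1 ys => simp [pvMerge]
  | case2 x xs => simp [pvMerge]
  | case3 x xs y ys h ih => simpa [pvMerge, h] using ih.cons x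
  | case4 x xs y ys h ih =>
      simp only [pvMerge, h, if_false]
      exact (ih.cons y).trans (List.perm_middle).symm

theorem mem_pvMerge {a : Int} {xs ys : List Int} :
    a ∈ pvMerge xs ys ↔ a ∈ xs ∨ a ∈ ys := by
  rw [(pvMerge_perm xs ys).mem_iff, List.mem_append]

theorem pvMerge_pairwise {xs ys : List Int} (hx : xs.Pairwise (· ≤ ·))
    (hy : ys.Pairwise (· ≤ ·)) : (pvMerge xs ys).Pairwise (· ≤ ·) := by
  induction xs, ys using pvMerge.induct with
  | case1 ys => simpa [pvMerge] using hy
  | case2 x xs => simpa [pvMerge] using hx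
  | case3 x xs y ys h ih =>
      simp only [pvMerge, h, if_true]
      refine List.pairwise_cons.mpr ⟨?_, ih (List.pairwise_cons.mp hx).2 hy⟩
      intro b hb
      rcases mem_pvMerge.mp hb with hb | hb
      · exact (List.pairwise_cons.mp hx).1 b hb
      · rcases List.mem_cons.mp hb with rfl | hb
        · exact h
        · exact le_trans h ((List.pairwise_cons.mp hy).1 b hb)
  | case4 x xs y ys h ih =>
      simp only [pvMerge, h, if_false]
      refine List.pairwise_cons.mpr ⟨?_, ih hx (List.pairwise_cons.mp hy).2⟩
      intro b hb
      have hyx : y ≤ x := le_of_lt (lt_of_not_ge h)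
      rcases mem_pvMerge.mp hb with hb | hb
      · rcases List.mem_cons.mp hb with rfl | hb
        · exact hyx
        · exact le_trans hyx ((List.pairwise_cons.mp hx).1 b hb)
      · exact (List.pairwise_cons.mp hy).1 b hb

theorem pvDropLe_eq_filter {l : List Int} (r : Int) (h : l.Pairwise (· ≤ ·)) :
    pvDropLe r l = l.filter (fun e => decide (r < e)) := by
  induction l with
  | nil => rfl
  | cons e t ih =>
      rcases List.pairwise_cons.mp h with ⟨he, ht⟩
      by_cases hc : e ≤ r
      · simp [pvDropLe, hc, not_lt.mpr hc, ih ht]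
      · have hr : r < e := lt_of_not_ge hc
        have : t.filter (fun e => decide (r < e)) = t := by
          apply List.filter_eq_self.mpr
          intro b hb
          exact decide_eq_true (lt_of_lt_of_le hr (he b hb))
        simp [pvDropLe, hc, hr, this]

theorem pvDropLe_merge {xs ys : List Int} (r : Int) (hx : xs.Pairwise (· ≤ ·))
    (hy : ys.Pairwise (· ≤ ·)) :
    pvDropLe r (pvMerge xs ys) = pvMerge (pvDropLe r xs) (pvDropLe r ys) := by
  have hxf := pvDropLe_eq_filter r hx
  have hyf := pvDropLe_eq_filter r hy
  have hm := pvMerge_pairwise hx hy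
  have hmf := pvDropLe_eq_filter r hm
  apply perm_asc_eq
  · rw [hmf, hxf, hyf]
    refine ((pvMerge_perm xs ys).filter _).trans ?_
    rw [List.filter_append]
    exact (pvMerge_perm _ _).symm
  · rw [hmf]; exact hm.filter _
  · exact pvMerge_pairwise (hxf ▸ hx.filter _) (hyf ▸ hy.filter _)



-- ===== skipDead / takeWhile facts =====

theorem skipDead_sublist (pr : Option Int) (l : List (Int × Int)) :
    (pvSkipDead pr l).Sublist l := by
  induction l with
  | nil => simp [pvSkipDead]
  | cons p t ih =>
      by_cases h : pvDead pr p
      · simp only [pvSkipDead, h, if_true]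
        exact ih.trans (List.sublist_cons_self p t)
      · simp [pvSkipDead, h]

theorem skipDead_head_alive {pr : Option Int} {l : List (Int × Int)} {p : Int × Int}
    {t : List (Int × Int)} (h : pvSkipDead pr l = p :: t) : pvDead pr p = false := by
  induction l with
  | nil => simp [pvSkipDead] at h
  | cons q s ih =>
      by_cases hq : pvDead pr q
      · exact ih (by simpa [pvSkipDead, hq] using h)
      · simp only [pvSkipDead, hq, if_false] at h
        cases h; simpa using hq

theorem filter_skipDead (pr : Option Int) (l : List (Int × Int)) :
    l.filter (fun p => !pvDead pr p) = (pvSkipDead pr l).filter (fun p => !pvDead pr p) := by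
  induction l with
  | nil => rfl
  | cons q s ih =>
      by_cases hq : pvDead pr q
      · simp [pvSkipDead, List.filter_cons, hq, ih]
      · simp [pvSkipDead, hq]

theorem skipDead_nil_of_all_dead {pr : Option Int} {l : List (Int × Int)}
    (h : ∀ p ∈ l, pvDead pr p = true) : pvSkipDead pr l = [] := by
  induction l with
  | nil => rfl
  | cons q s ih =>
      simp only [pvSkipDead, h q (List.mem_cons_self), if_true]
      exact ih (fun p hp => h p (List.mem_cons_of_mem q hp))

theorem all_dead_of_filter_nil {pr : Option Int} {l : List (Int × Int)}
    (h : l.filter (fun p => !pvDead pr p) = []) : ∀ p ∈ l, pvDead pr p = true := by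
  intro p hp
  by_contra hd
  have : p ∈ l.filter (fun p => !pvDead pr p) :=
    List.mem_filter.mpr ⟨hp, by simpa using hd⟩
  simp [h] at this

theorem mem_takeWhile_fst {left : Int} {l g : List (Int × Int)}
    (hg : g = l.takeWhile (fun p => p.1 == left)) : ∀ p ∈ g, p.1 = left := by
  intro p hp
  subst hg
  have := List.mem_takeWhile_imp hp
  simpa using this

theorem dropWhile_head_not {α : Type} {p : α → Bool} {l : List α} {q : α} {t : List α}
    (h : l.dropWhile p = q :: t) : p q = false := by
  induction l with
  | nil => simp at h
  | cons a s ih =>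
      by_cases ha : p a
      · exact ih (by simpa [List.dropWhile_cons, ha] using h)
      · rw [List.dropWhile_cons] at h
        simp only [ha, if_neg] at h
        · cases h; simpa using ha

-- ===== scan characterisation =====

theorem pvScan_group {left r : Int} {g rest : List (Int × Int)}
    (hg : ∀ p ∈ g, p.1 = left) : pvScan left r (g ++ rest) = pvScan left r rest := by
  induction g with
  | nil => rfl
  | cons p t ih =>
      simp only [List.cons_append, pvScan, hg p (List.mem_cons_self), if_true]
      exact ih (fun q hq => hg q (List.mem_cons_of_mem p hq))

-- ===== measure =====

def pvMu (l : List (Int × Int)) : Nat := pvSpan l + l.length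

theorem pvMu_perm {l₁ l₂ : List (Int × Int)} (h : l₁.Perm l₂) : pvMu l₁ = pvMu l₂ := by
  unfold pvMu pvSpan
  rw [(h.map _).sum_eq, h.length_eq]

theorem pvMu_append (l₁ l₂ : List (Int × Int)) : pvMu (l₁ ++ l₂) = pvMu l₁ + pvMu l₂ := by
  unfold pvMu pvSpan
  simp [List.sum_append]
  omega

theorem pvMu_sublist {l₁ l₂ : List (Int × Int)} (h : l₁.Sublist l₂) : pvMu l₁ ≤ pvMu l₂ := by
  induction h with
  | slnil => exact le_refl _
  | cons a h ih => unfold pvMu pvSpan at *; simp; omega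
  | cons₂ a h ih => unfold pvMu pvSpan at *; simp at *; omega

theorem span_map_le {left cs' : Int} (h : left ≤ cs') (M : List Int) :
    pvSpan (M.map (fun e => (cs', e))) ≤ pvSpan (M.map (fun e => (left, e))) := by
  induction M with
  | nil => exact le_refl _
  | cons e t ih =>
      unfold pvSpan at *
      simp only [List.map_cons, List.map_map, List.sum_cons] at *
      have : (e + 1 - cs').toNat ≤ (e + 1 - left).toNat := by omega
      omega

theorem mu_drop_le {left cs' r : Int} (h : left ≤ cs') (M : List Int) :
    pvMu ((pvDropLe r M).map (fun e => (cs', e))) ≤ pvMu (M.map (fun e => (left, e))) := by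
  induction M with
  | nil => exact le_refl _
  | cons e t ih =>
      by_cases hc : e ≤ r
      · simp only [pvDropLe, hc, if_true]
        refine le_trans ih ?_
        unfold pvMu pvSpan
        simp only [List.map_cons, List.map_map, List.sum_cons, List.length_cons]
        omega
      · simp only [pvDropLe, hc, if_false]
        unfold pvMu
        have h1 := span_map_le h (e :: t)
        simp only [List.length_map]
        omega


-- ===== sweep-state facts =====

-- every element after the start group has a strictly larger start
theorem rest_starts {pr : Option Int} {left cs : Int} {suffix rest : List (Int × Int)}
    {carry : List Int}
    (hpw : suffix.Pairwise LexLe)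
    (hrest : rest = (pvSkipDead pr suffix).dropWhile (fun p => p.1 == left))
    (hor : (∃ b t', pvSkipDead pr suffix = (left, b) :: t') ∨
      ((pvSkipDead pr suffix).takeWhile (fun p => p.1 == left) = [] ∧ carry ≠ []))
    (hI5 : carry ≠ [] → ∀ p ∈ suffix, pvDead pr p = false → cs ≤ p.1)
    (hcs : carry ≠ [] → left = cs) :
    ∀ q ∈ rest, left < q.1 := by
  have hsub : (pvSkipDead pr suffix).Sublist suffix := skipDead_sublist pr suffix
  have hpwsuf : (pvSkipDead pr suffix).Pairwise LexLe := hpw.sublist hsub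
  cases hr : rest with
  | nil => intro q hq; simp [hr] at hq
  | cons h0 t0 =>
      have hne : h0.1 ≠ left := by
        have := dropWhile_head_not (hrest ▸ hr : (pvSkipDead pr suffix).dropWhile
          (fun p => p.1 == left) = h0 :: t0)
        simpa using this
      have hge : left ≤ h0.1 := by
        rcases hor with ⟨b, t', hsuf⟩ | ⟨hgnil, hcne⟩
        · -- group nonempty: h0 comes after (left, b) in the sorted suffix
          have hh0 : h0 ∈ t' := by
            have : rest.Sublist t' := by
              rw [hrest, hsuf]
              simp only [List.dropWhile_cons]
              split
              · exact List.dropWhile_sublist _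
              · simp_all
            exact this.mem (by rw [hr]; exact List.mem_cons_self)
          have := (List.pairwise_cons.mp (hsuf ▸ hpwsuf)).1 h0 hh0
          rcases this with h | ⟨he, _⟩
          · exact le_of_lt h
          · exact le_of_eq he
        · -- group empty: rest = suf, its head is alive with start ≥ cs = left
          have hrs : rest = pvSkipDead pr suffix := by
            conv_rhs => rw [← List.takeWhile_append_dropWhile
              (p := fun p => p.1 == left) (l := pvSkipDead pr suffix)]
            rw [hgnil, List.nil_append, hrest]
          have hmem : h0 ∈ suffix := hsub.mem (by rw [← hrs, hr]; exact List.mem_cons_self)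
          have halive : pvDead pr h0 = false :=
            skipDead_head_alive (l := suffix) (by rw [← hrs, hr])
          rw [hcs hcne]
          exact hI5 hcne h0 hmem halive
      have hlt : left < h0.1 := lt_of_le_of_ne hge (Ne.symm hne)
      intro q hq
      rcases List.mem_cons.mp hq with rfl | hq'
      · exact hlt
      · have hpwr : rest.Pairwise LexLe := hpwsuf.sublist (hrest ▸ List.dropWhile_sublist _)
        have hle := (List.pairwise_cons.mp (hr ▸ hpwr)).1 q hq'
        rcases hle with h | ⟨he, _⟩
        · exact lt_trans hlt h
        · exact he ▸ hlt

-- ends of the alive start group are ascending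
theorem gEnds_pairwise {pr : Option Int} {left : Int} {suf : List (Int × Int)}
    (hpw : suf.Pairwise LexLe) :
    (((suf.takeWhile (fun p => p.1 == left)).filter
      (fun p => !pvDead pr p)).map (fun p => p.2)).Pairwise (· ≤ ·) := by
  have h1 : (suf.takeWhile (fun p => p.1 == left)).Pairwise LexLe :=
    hpw.sublist (List.takeWhile_sublist _)
  have h2 := (h1.filter (fun p => !pvDead pr p))
  rw [List.pairwise_map]
  refine h2.imp_of_mem ?_
  intro p q hp hq hpq
  have hpl : p.1 = left := by
    simpa using List.mem_takeWhile_imp (List.mem_of_mem_filter hp)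
  have hql : q.1 = left := by
    simpa using List.mem_takeWhile_imp (List.mem_of_mem_filter hq)
  rcases hpq with h | ⟨_, h⟩
  · rw [hpl, hql] at h; exact absurd h (lt_irrefl left)
  · exact h


theorem pvDropLe_nil_of_all_le {r : Int} {l : List Int} (h : ∀ e ∈ l, e ≤ r) :
    pvDropLe r l = [] := by
  induction l with
  | nil => rfl
  | cons e t ih =>
      simp only [pvDropLe, h e List.mem_cons_self, if_true]
      exact ih (fun x hx => h x (List.mem_cons_of_mem e hx))

theorem pvDropLe_pairwise {r : Int} {l : List Int} (h : l.Pairwise (· ≤ ·)) :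
    (pvDropLe r l).Pairwise (· ≤ ·) := by
  rw [pvDropLe_eq_filter r h]; exact h.filter _

theorem mem_pvDropLe {r : Int} {l : List Int} (h : l.Pairwise (· ≤ ·)) {e : Int}
    (he : e ∈ pvDropLe r l) : e ∈ l ∧ r < e := by
  rw [pvDropLe_eq_filter r h] at he
  have := List.mem_filter.mp he
  exact ⟨this.1, by simpa using this.2⟩

theorem step_core (fb fa : Nat) (suffix : List (Int × Int)) (carry : List Int)
    (cs left e0 : Int) (Mt : List Int) (pr : Option Int) (l : List (Int × Int))
    (rest : List (Int × Int)) (gE : List Int) (right : Int)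
    (hpw : suffix.Pairwise LexLe)
    (hcarry : carry.Pairwise (· ≤ ·))
    (hI3 : ∀ r, pr = some r → ∀ e ∈ carry, r < e)
    (hI4 : ∀ r, pr = some r → ∀ p ∈ suffix, r < p.2 → r < p.1)
    (hI6 : ∀ r, pr = some r → carry ≠ [] → r < cs)
    (hI3b : pr = none → carry = [])
    (hI5 : carry ≠ [] → ∀ p ∈ suffix, pvDead pr p = false → cs ≤ p.1)
    (hperm : l.Perm (carry.map (fun e => (cs, e)) ++ suffix.filter (fun p => !pvDead pr p)))
    (hl : l ≠ [])
    (hgE : gE = (((pvSkipDead pr suffix).takeWhile (fun p => p.1 == left)).filter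
      (fun p => !pvDead pr p)).map (fun p => p.2))
    (hrest : rest = (pvSkipDead pr suffix).dropWhile (fun p => p.1 == left))
    (hM : pvMerge carry gE = e0 :: Mt)
    (hcseq : carry ≠ [] → left = cs)
    (hor : (∃ b t', pvSkipDead pr suffix = (left, b) :: t') ∨
      ((pvSkipDead pr suffix).takeWhile (fun p => p.1 == left) = [] ∧ carry ≠ []))
    (hrightdef : right = (match pvSkipDead pr rest with
      | [] => e0
      | (a, _) :: _ => if a ≤ e0 then a - 1 else e0))
    (hfb : pvMu l + 1 ≤ fb + 1) (hfa : pvMu l + 1 ≤ fa)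
    (ih : ∀ (suffix : List (Int × Int)) (carry : List Int) (cs : Int) (pr : Option Int)
      (fa : Nat) (l : List (Int × Int)),
      suffix.Pairwise LexLe →
      carry.Pairwise (· ≤ ·) →
      (∀ r, pr = some r → ∀ e ∈ carry, r < e) →
      (∀ r, pr = some r → ∀ p ∈ suffix, r < p.2 → r < p.1) →
      (∀ r, pr = some r → carry ≠ [] → r < cs) →
      (pr = none → carry = []) →
      (carry ≠ [] → ∀ p ∈ suffix, pvDead pr p = false → cs ≤ p.1) →
      l.Perm (carry.map (fun e => (cs, e)) ++ suffix.filter (fun p => !pvDead pr p)) →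
      pvMu l + 1 ≤ fb → pvMu l + 1 ≤ fa →
      pvRecA fa l = pvLoop fb suffix carry cs pr) :
    pvRecA fa l = (left, right) :: pvLoop fb rest
      (pvMerge (pvDropLe right carry) (pvDropLe right gE))
      (if right < left then left else right + 1) (some right) := by
  -- notation
  have hsub : (pvSkipDead pr suffix).Sublist suffix := skipDead_sublist pr suffix
  have hsfx_pw : (pvSkipDead pr suffix).Pairwise LexLe := hpw.sublist hsub
  have hrest_sub : rest.Sublist (pvSkipDead pr suffix) := hrest ▸ List.dropWhile_sublist _
  have hrest_pw : rest.Pairwise LexLe := hsfx_pw.sublist hrest_sub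
  have hgE_pw : gE.Pairwise (· ≤ ·) := hgE ▸ gEnds_pairwise hsfx_pw
  have hM_pw : (e0 :: Mt).Pairwise (· ≤ ·) := hM ▸ pvMerge_pairwise hcarry hgE_pw
  have hrs : ∀ q ∈ rest, left < q.1 := rest_starts hpw hrest hor hI5 hcseq
  have halive_gE : ∀ e ∈ gE, ∀ r, pr = some r → r < e := by
    intro e he r hr
    rw [hgE] at he
    obtain ⟨p, hp, rfl⟩ := List.mem_map.mp he
    have := (List.mem_filter.mp hp).2
    subst hr
    simp [pvDead] at this
    exact this
  have hmemM : ∀ e ∈ e0 :: Mt, e ∈ carry ∨ e ∈ gE := by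
    intro e he; exact mem_pvMerge.mp (hM ▸ he)
  have he0_gt : ∀ r, pr = some r → r < e0 := by
    intro r hr
    rcases hmemM e0 List.mem_cons_self with h | h
    · exact hI3 r hr e0 h
    · exact halive_gE e0 h r hr
  have hleft_gt : ∀ r, pr = some r → r < left := by
    intro r hr
    by_cases hc : carry = []
    · rcases hor with ⟨b, t', hsfx⟩ | ⟨_, hcne⟩
      · have hmem : (left, b) ∈ suffix := hsub.mem (by rw [hsfx]; exact List.mem_cons_self)
        have halive : pvDead pr (left, b) = false := skipDead_head_alive hsfx
        have : r < b := by subst hr; simp [pvDead] at halive; exact halive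
        exact hI4 r hr (left, b) hmem this
      · exact absurd hc hcne
    · exact (hcseq hc) ▸ hI6 r hr hc
  -- the canonical sorted current list
  set R : List (Int × Int) := rest.filter (fun p => !pvDead pr p) with hR
  set S : List (Int × Int) := (e0 :: Mt).map (fun e => (left, e)) ++ R with hSdef
  have hR_pw : R.Pairwise LexLe := hrest_pw.filter _
  have hS_pw : S.Pairwise LexLe := by
    rw [hSdef]
    refine List.pairwise_append.mpr ⟨?_, hR_pw, ?_⟩
    · rw [List.pairwise_map]
      exact hM_pw.imp (fun h => Or.inr ⟨rfl, h⟩)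
    · intro x hx y hy
      obtain ⟨e, _, rfl⟩ := List.mem_map.mp hx
      exact Or.inl (hrs y (List.mem_of_mem_filter hy))
  have hCF_S : (carry.map (fun e => (cs, e)) ++
      suffix.filter (fun p => !pvDead pr p)).Perm S := by
    have e1 := filter_skipDead pr suffix
    have e2 : (pvSkipDead pr suffix).filter (fun p => !pvDead pr p) =
        ((pvSkipDead pr suffix).takeWhile (fun p => p.1 == left)).filter
          (fun p => !pvDead pr p) ++ R := by
      conv_lhs => rw [← List.takeWhile_append_dropWhile
        (p := fun p => p.1 == left) (l := pvSkipDead pr suffix)]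
      rw [List.filter_append, hR, hrest]
    have e4 : ((pvSkipDead pr suffix).takeWhile (fun p => p.1 == left)).filter
        (fun p => !pvDead pr p) = gE.map (fun e => (left, e)) := by
      rw [hgE, List.map_map]
      refine Eq.symm ?_
      have hfun : ∀ p ∈ ((pvSkipDead pr suffix).takeWhile (fun p => p.1 == left)).filter
          (fun p => !pvDead pr p), ((fun e => ((left : Int), e)) ∘ (fun p => p.2)) p = p := by
        intro p hp
        have hpl : p.1 = left := mem_takeWhile_fst rfl p (List.mem_of_mem_filter hp)
        cases p with
        | mk a b => simp only [Function.comp]; simp at hpl; simp [hpl]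
      exact (List.map_congr_left hfun).trans (List.map_id _)
    have e5 : carry.map (fun e => ((cs : Int), e)) = carry.map (fun e => (left, e)) := by
      by_cases hc : carry = []
      · subst hc; rfl
      · rw [hcseq hc]
    have hP1 : ((e0 :: Mt).map (fun e => ((left : Int), e))).Perm
        ((carry.map (fun e => (left, e))) ++ (gE.map (fun e => (left, e)))) := by
      rw [← List.map_append, ← hM]
      exact (pvMerge_perm carry gE).map _
    refine List.Perm.symm ?_
    have step1 : S.Perm (((carry.map (fun e => (left, e))) ++
        (gE.map (fun e => (left, e)))) ++ R) := by
      rw [hSdef]; exact hP1.append_right R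
    refine step1.trans ?_
    have heq : carry.map (fun e => ((cs : Int), e)) ++ suffix.filter (fun p => !pvDead pr p) =
        carry.map (fun e => (left, e)) ++ ((gE.map (fun e => (left, e))) ++ R) := by
      rw [e5, e1, e2, e4]
    rw [List.append_assoc, ← heq]
  have hS : l.mergeSort pvLexLe = S := sort_eq (hperm.trans hCF_S) hS_pw
  have hlS : l.Perm S := (l.mergeSort_perm pvLexLe).symm.trans (hS ▸ List.Perm.refl _)
  -- packaged facts about `right`
  have hRsd : R = (pvSkipDead pr rest).filter (fun p => !pvDead pr p) := by
    rw [hR]; exact filter_skipDead pr rest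
  have hpack : pvScan left e0 R = right ∧ right ≤ e0 ∧ (right < e0 → left ≤ right) ∧
      (∀ q ∈ rest, right < q.2 → right < q.1) ∧ (∀ r, pr = some r → r < right) := by
    cases hsd2 : pvSkipDead pr rest with
    | nil =>
        replace hrightdef : right = e0 := by rw [hrightdef, hsd2]
        have hRnil : R = [] := by rw [hRsd, hsd2]; rfl
        have hdead : ∀ q ∈ rest, pvDead pr q = true :=
          all_dead_of_filter_nil (by rw [← hR]; exact hRnil)
        refine ⟨by rw [hRnil, hrightdef]; rfl, le_of_eq hrightdef, ?_, ?_, ?_⟩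
        · intro h; rw [hrightdef] at h; exact absurd h (lt_irrefl e0)
        · intro q hq hq2
          have := hdead q hq
          cases hpr : pr with
          | none => rw [hpr] at this; simp [pvDead] at this
          | some r =>
              rw [hpr] at this; simp [pvDead] at this
              have := he0_gt r hpr
              rw [hrightdef] at hq2
              omega
        · intro r hr; rw [hrightdef]; exact he0_gt r hr
    | cons p2 t2 =>
        obtain ⟨a2, b2⟩ := p2
        replace hrightdef : right = if a2 ≤ e0 then a2 - 1 else e0 := by
          rw [hrightdef, hsd2]
        have halive2 : pvDead pr (a2, b2) = false := skipDead_head_alive hsd2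
        have hmem2 : (a2, b2) ∈ rest := (skipDead_sublist pr rest).mem
          (by rw [hsd2]; exact List.mem_cons_self)
        have ha2 : left < a2 := hrs (a2, b2) hmem2
        have hRcons : R = (a2, b2) :: t2.filter (fun p => !pvDead pr p) := by
          rw [hRsd, hsd2, List.filter_cons, halive2]; simp
        have hscan : pvScan left e0 R = right := by
          rw [hRcons]
          simp only [pvScan, if_neg (by exact fun h => absurd h (ne_of_gt ha2) : ¬(a2 = left))]
          rw [hrightdef]
        have hq1ge : ∀ q ∈ R, a2 ≤ q.1 := by
          intro q hq
          rw [hRcons] at hq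
          rcases List.mem_cons.mp hq with rfl | hq'
          · exact le_refl _
          · have hle := (List.pairwise_cons.mp (hRcons ▸ hR_pw)).1 q hq'
            rcases hle with h | ⟨he, _⟩
            · exact le_of_lt h
            · exact le_of_eq he
        refine ⟨hscan, ?_, ?_, ?_, ?_⟩
        · rw [hrightdef]; split <;> omega
        · intro h; rw [hrightdef] at h ⊢
          by_cases hc : a2 ≤ e0
          · rw [if_pos hc] at h ⊢; omega
          · rw [if_neg hc] at h; exact absurd h (lt_irrefl e0)
        · intro q hq hq2
          have hqa : pvDead pr q = false := by
            cases hpr : pr with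
            | none => rfl
            | some r =>
                have hr : r < right := by
                  rw [hrightdef]
                  by_cases hc : a2 ≤ e0
                  · rw [if_pos hc]
                    have := hleft_gt r hpr
                    omega
                  · rw [if_neg hc]; exact he0_gt r hpr
                simp [pvDead]
                omega
          have hqR : q ∈ R := List.mem_filter.mpr ⟨hq, by simp [hqa]⟩
          have := hq1ge q hqR
          rw [hrightdef] at hq2 ⊢
          by_cases hc : a2 ≤ e0
          · rw [if_pos hc] at hq2 ⊢; omega
          · rw [if_neg hc] at hq2 ⊢; omega
        · intro r hr
          rw [hrightdef]
          by_cases hc : a2 ≤ e0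
          · rw [if_pos hc]
            have := hleft_gt r hr
            omega
          · rw [if_neg hc]; exact he0_gt r hr
  obtain ⟨hscanR, hre, hcut, hi4', hrgt⟩ := hpack
  have hScons : S = (left, e0) :: (Mt.map (fun e => (left, e)) ++ R) := by
    rw [hSdef]; rfl
  have hscanS : pvScan left e0 S = right := by
    rw [hSdef]
    rw [pvScan_group (fun p hp => by
      obtain ⟨e, _, rfl⟩ := List.mem_map.mp hp; rfl)]
    exact hscanR
  set cs' := if right < left then left else right + 1 with hcs'
  set carry2 := pvMerge (pvDropLe right carry) (pvDropLe right gE) with hcarry2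
  have hdropM : pvDropLe right (e0 :: Mt) = carry2 := by
    rw [hcarry2, ← hM]
    exact pvDropLe_merge right hcarry hgE_pw
  have hcarry2_pw : carry2.Pairwise (· ≤ ·) := by
    rw [← hdropM]; exact pvDropLe_pairwise hM_pw
  have hfe : R.filter (fun el => decide (right < el.2)) =
      rest.filter (fun p => !pvDead (some right) p) := by
    rw [hR, List.filter_filter]
    apply List.filter_congr
    intro q hq
    by_cases h2 : right < q.2
    · have ha : pvDead pr q = false := by
        cases hpr : pr with
        | none => rfl
        | some r =>
            have := hrgt r hpr
            simp only [pvDead, decide_eq_false_iff_not, not_le]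
            omega
      have hA1 : decide (right < q.2) = true := decide_eq_true h2
      have hA2 : decide (q.2 ≤ right) = false := decide_eq_false (not_le.mpr h2)
      rw [ha]; simp [pvDead, hA1, hA2]
    · have hA1 : decide (right < q.2) = false := decide_eq_false h2
      have hA2 : decide (q.2 ≤ right) = true := decide_eq_true (not_lt.mp h2)
      simp [pvDead, hA1, hA2]
  have htrunc : (S.filter (fun el => decide (right < el.2))).map
      (fun el => if el.1 ≤ right then (right + 1, el.2) else el) =
      carry2.map (fun e => (cs', e)) ++ rest.filter (fun p => !pvDead (some right) p) := by
    rw [hSdef, List.filter_append, List.map_append]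
    congr 1
    · rw [List.filter_map]
      have hcomp : ((fun el : Int × Int => decide (right < el.2)) ∘
          (fun e => ((left : Int), e))) = fun e => decide (right < e) := rfl
      rw [hcomp, ← pvDropLe_eq_filter right hM_pw, hdropM, List.map_map]
      apply List.map_congr_left
      intro e _
      simp only [Function.comp]
      by_cases hlr : left ≤ right
      · rw [if_pos hlr, hcs', if_neg (not_lt.mpr hlr)]
      · rw [if_neg hlr, hcs', if_pos (lt_of_not_ge hlr)]
    · rw [← hfe]
      have hid : ∀ q ∈ R.filter (fun el => decide (right < el.2)),
          (if q.1 ≤ right then ((right + 1 : Int), q.2) else q) = q := by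
        intro q hq
        have h1 := List.mem_filter.mp hq
        have h2 : right < q.2 := by simpa using h1.2
        have hqrest : q ∈ rest := List.mem_of_mem_filter (hR ▸ h1.1)
        have h3 : right < q.1 := hi4' q hqrest h2
        rw [if_neg (not_le.mpr h3)]
      exact (List.map_congr_left hid).trans (List.map_id _)
  -- measure decrease
  have hmuS : pvMu l = pvMu S := pvMu_perm hlS
  have hMap : pvMu (carry2.map (fun e => (cs', e))) <
      pvMu ((e0 :: Mt).map (fun e => ((left : Int), e))) := by
    by_cases hce : right < e0
    · have hle : left ≤ right := hcut hce
      have hdrop : pvDropLe right (e0 :: Mt) = e0 :: Mt := by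
        show (if e0 ≤ right then pvDropLe right Mt else e0 :: Mt) = e0 :: Mt
        rw [if_neg (by omega : ¬ e0 ≤ right)]
      rw [← hdropM, hdrop]
      have hcsv : cs' = right + 1 := by rw [hcs', if_neg (not_lt.mpr hle)]
      rw [hcsv]
      have h1 := span_map_le (by omega : left ≤ right + 1) Mt
      unfold pvMu pvSpan at h1 ⊢
      simp only [List.map_cons, List.map_map, List.sum_cons, List.length_map,
        List.length_cons] at h1 ⊢
      have h2 : ((e0 : Int) + 1 - (right + 1)).toNat < (e0 + 1 - left).toNat := by omega
      omega
    · have hr0 : right = e0 := le_antisymm hre (not_lt.mp hce)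
      have hdrop : pvDropLe right (e0 :: Mt) = pvDropLe right Mt := by
        simp [pvDropLe, hr0]
      have hlecs : left ≤ cs' := by
        rw [hcs']
        split
        · exact le_refl _
        · omega
      rw [← hdropM, hdrop]
      refine lt_of_le_of_lt (mu_drop_le hlecs Mt) ?_
      unfold pvMu pvSpan
      simp only [List.map_cons, List.map_map, List.sum_cons, List.length_map,
        List.length_cons]
      omega
  have hmuR : pvMu (rest.filter (fun p => !pvDead (some right) p)) ≤ pvMu R := by
    rw [← hfe]
    exact pvMu_sublist List.filter_sublist
  have htmu : pvMu ((S.filter (fun el => decide (right < el.2))).map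
      (fun el => if el.1 ≤ right then (right + 1, el.2) else el)) < pvMu l := by
    rw [htrunc, pvMu_append, hmuS, hSdef, pvMu_append]
    omega
  -- unfold A
  obtain ⟨fa', rfl⟩ : ∃ fa', fa = fa' + 1 := ⟨fa - 1, by omega⟩
  by_cases hlen : l.length = 1
  · -- A's singleton base case: B emits the same interval and then stops
    have hSlen : S.length = 1 := by rw [← hlS.length_eq]; exact hlen
    have hMtR : Mt = [] ∧ R = [] := by
      rw [hSdef] at hSlen
      simp only [List.length_append, List.length_map, List.length_cons] at hSlen
      constructor
      · exact List.length_eq_zero_iff.mp (by omega)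
      · exact List.length_eq_zero_iff.mp (by omega)
    obtain ⟨hMt, hR0⟩ := hMtR
    have hSx : S = [(left, e0)] := by rw [hScons, hMt, hR0]; rfl
    have hlx : l = [(left, e0)] := List.perm_singleton.mp (hSx ▸ hlS)
    have hsdnil : pvSkipDead pr rest = [] := by
      cases hsd2 : pvSkipDead pr rest with
      | nil => rfl
      | cons p2 t2 =>
          exfalso
          have halive2 : pvDead pr p2 = false := skipDead_head_alive hsd2
          have : R = p2 :: t2.filter (fun p => !pvDead pr p) := by
            rw [hRsd, hsd2, List.filter_cons, halive2]; simp
          rw [hR0] at this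
          exact List.cons_ne_nil _ _ this.symm
    have hrd : right = e0 := by rw [hrightdef, hsdnil]
    have hA : pvRecA (fa' + 1) l = [(left, e0)] := by
      rw [hlx]; simp [pvRecA]
    have hallM : ∀ e, e ∈ carry ∨ e ∈ gE → e ≤ right := by
      intro e he
      have : e ∈ pvMerge carry gE := mem_pvMerge.mpr he
      rw [hM, hMt] at this
      rcases List.mem_cons.mp this with rfl | h
      · omega
      · simp at h
    have hcar2 : carry2 = [] := by
      rw [hcarry2, pvDropLe_nil_of_all_le (fun e he => hallM e (Or.inl he)),
        pvDropLe_nil_of_all_le (fun e he => hallM e (Or.inr he))]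
      simp [pvMerge]
    have hdeadrest : ∀ q ∈ rest, pvDead (some right) q = true := by
      intro q hq
      by_contra hqd
      have h2 : right < q.2 := by
        simp only [pvDead, decide_eq_true_eq] at hqd
        omega
      have ha : pvDead pr q = false := by
        cases hpr : pr with
        | none => rfl
        | some r =>
            have := hrgt r hpr
            simp only [pvDead, decide_eq_false_iff_not, not_le]
            omega
      have : q ∈ R := by
        rw [hR]
        exact List.mem_filter.mpr ⟨hq, by simp [ha]⟩
      rw [hR0] at this
      simp at this
    obtain ⟨fb', rfl⟩ : ∃ fb', fb = fb' + 1 := ⟨fb - 1, by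
      have : 1 ≤ pvMu l := by rw [hlx]; unfold pvMu; simp
      omega⟩
    have hB0 : pvLoop (fb' + 1) rest carry2 cs' (some right) = [] := by
      simp only [pvLoop, skipDead_nil_of_all_dead hdeadrest, hcar2]
    rw [hA, hB0]
    rw [hrd]
  · -- general case
    have h1 : l.length ≠ 0 := fun h => hl (List.length_eq_zero_iff.mp h)
    have hA : pvRecA (fa' + 1) l =
        (left, pvScan left e0 S) :: pvRecA fa'
          ((S.filter (fun el => decide (pvScan left e0 S < el.2))).map
            (fun el => if el.1 ≤ pvScan left e0 S then (pvScan left e0 S + 1, el.2) else el)) := by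
      conv_lhs => rw [pvRecA]
      rw [if_neg hl, if_neg hlen, hS, hScons]
    rw [hA, hscanS, htrunc]
    congr 1
    apply ih rest carry2 cs' (some right) fa'
      ((carry2.map (fun e => (cs', e)) ++ rest.filter (fun p => !pvDead (some right) p)))
      hrest_pw hcarry2_pw
    · intro r hr e he
      cases hr
      rw [hcarry2] at he
      rcases mem_pvMerge.mp he with h | h
      · exact (mem_pvDropLe hcarry h).2
      · exact (mem_pvDropLe hgE_pw h).2
    · intro r hr p hp h2
      cases hr
      exact hi4' p hp h2
    · intro r hr _
      cases hr
      rw [hcs']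
      split <;> omega
    · intro h; exact absurd h (by simp)
    · intro _ p hp ha
      have h2 : right < p.2 := by
        simp only [pvDead, decide_eq_false_iff_not, not_le] at ha
        simpa using ha
      have h3 : right < p.1 := hi4' p hp h2
      have h4 : left < p.1 := hrs p hp
      rw [hcs']
      split <;> omega
    · exact List.Perm.refl _
    · have := htmu
      rw [htrunc] at this
      omega
    · have := htmu
      rw [htrunc] at this
      omega

theorem main_sim : ∀ (fb : Nat) (suffix : List (Int × Int)) (carry : List Int)
    (cs : Int) (pr : Option Int) (fa : Nat) (l : List (Int × Int)),
    suffix.Pairwise LexLe →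
    carry.Pairwise (· ≤ ·) →
    (∀ r, pr = some r → ∀ e ∈ carry, r < e) →
    (∀ r, pr = some r → ∀ p ∈ suffix, r < p.2 → r < p.1) →
    (∀ r, pr = some r → carry ≠ [] → r < cs) →
    (pr = none → carry = []) →
    (carry ≠ [] → ∀ p ∈ suffix, pvDead pr p = false → cs ≤ p.1) →
    l.Perm (carry.map (fun e => (cs, e)) ++ suffix.filter (fun p => !pvDead pr p)) →
    pvMu l + 1 ≤ fb → pvMu l + 1 ≤ fa →
    pvRecA fa l = pvLoop fb suffix carry cs pr := by
  intro fb
  induction fb with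
  | zero => intro _ _ _ _ _ _ _ _ _ _ _ _ _ _ hfb _; omega
  | succ fb ih =>
      intro suffix carry cs pr fa l hpw hcarry hI3 hI4 hI6 hI3b hI5 hperm hfb hfa
      by_cases hl : l = []
      · -- both sides are empty
        subst hl
        have hcf : carry.map (fun e => ((cs : Int), e)) ++
            suffix.filter (fun p => !pvDead pr p) = [] := by
          have := hperm.symm
          exact this.eq_nil
        obtain ⟨hc0, hf0⟩ := List.append_eq_nil_iff.mp hcf
        have hcnil : carry = [] := List.map_eq_nil_iff.mp hc0
        have hsd : pvSkipDead pr suffix = [] :=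
          skipDead_nil_of_all_dead (all_dead_of_filter_nil hf0)
        obtain ⟨fa', rfl⟩ : ∃ fa', fa = fa' + 1 := ⟨fa - 1, by omega⟩
        rw [hcnil]
        simp [pvRecA, pvLoop, hsd]
      · -- extract the head of the sweep state, then run one simulated stage
        have hstep : ∃ left e0 Mt,
            pvLoop (fb + 1) suffix carry cs pr =
              (left, (match pvSkipDead pr
                  ((pvSkipDead pr suffix).dropWhile (fun p => p.1 == left)) with
                | [] => e0
                | (a, _) :: _ => if a ≤ e0 then a - 1 else e0)) ::
              pvLoop fb ((pvSkipDead pr suffix).dropWhile (fun p => p.1 == left))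
                (pvMerge
                  (pvDropLe (match pvSkipDead pr
                      ((pvSkipDead pr suffix).dropWhile (fun p => p.1 == left)) with
                    | [] => e0
                    | (a, _) :: _ => if a ≤ e0 then a - 1 else e0) carry)
                  (pvDropLe (match pvSkipDead pr
                      ((pvSkipDead pr suffix).dropWhile (fun p => p.1 == left)) with
                    | [] => e0
                    | (a, _) :: _ => if a ≤ e0 then a - 1 else e0)
                    ((((pvSkipDead pr suffix).takeWhile (fun p => p.1 == left)).filter
                      (fun p => !pvDead pr p)).map (fun p => p.2))))
                (if (match pvSkipDead pr
                      ((pvSkipDead pr suffix).dropWhile (fun p => p.1 == left)) with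
                    | [] => e0
                    | (a, _) :: _ => if a ≤ e0 then a - 1 else e0) < left then left
                  else (match pvSkipDead pr
                      ((pvSkipDead pr suffix).dropWhile (fun p => p.1 == left)) with
                    | [] => e0
                    | (a, _) :: _ => if a ≤ e0 then a - 1 else e0) + 1)
                (some (match pvSkipDead pr
                    ((pvSkipDead pr suffix).dropWhile (fun p => p.1 == left)) with
                  | [] => e0
                  | (a, _) :: _ => if a ≤ e0 then a - 1 else e0)) ∧
            pvMerge carry ((((pvSkipDead pr suffix).takeWhile
              (fun p => p.1 == left)).filter (fun p => !pvDead pr p)).map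
                (fun p => p.2)) = e0 :: Mt ∧
            (carry ≠ [] → left = cs) ∧
            ((∃ b t', pvSkipDead pr suffix = (left, b) :: t') ∨
              ((pvSkipDead pr suffix).takeWhile (fun p => p.1 == left) = [] ∧
                carry ≠ [])) := by
          cases hc : carry with
          | nil =>
              cases hs : pvSkipDead pr suffix with
              | nil =>
                  exfalso
                  apply hl
                  have hfil : suffix.filter (fun p => !pvDead pr p) = [] := by
                    rw [filter_skipDead pr suffix, hs]; rfl
                  have hpn : l.Perm [] := by simpa [hc, hfil] using hperm
                  exact hpn.eq_nil
              | cons s0 t =>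
                  obtain ⟨a, b⟩ := s0
                  have halive : pvDead pr (a, b) = false := skipDead_head_alive hs
                  refine ⟨a, b, ((t.takeWhile (fun p => p.1 == a)).filter
                    (fun p => !pvDead pr p)).map (fun p => p.2), ?_, ?_, ?_, ?_⟩
                  · simp only [pvLoop, hs]
                  · simp [List.takeWhile_cons, List.filter_cons, halive, pvMerge]
                  · intro h; exact absurd rfl h
                  · exact Or.inl ⟨b, t, rfl⟩
          | cons c0 ct =>
              cases hs : pvSkipDead pr suffix with
              | nil =>
                  refine ⟨cs, c0, ct, ?_, ?_, ?_, ?_⟩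
                  · simp only [pvLoop, hs]
                  · simp [pvMerge]
                  · intro _; rfl
                  · exact Or.inr ⟨by simp, by simp⟩
              | cons s0 t =>
                  obtain ⟨a, b⟩ := s0
                  have halive : pvDead pr (a, b) = false := skipDead_head_alive hs
                  by_cases hab : a = cs ∧ b < c0
                  · refine ⟨cs, b, pvMerge (c0 :: ct) (((t.takeWhile
                      (fun p => p.1 == cs)).filter (fun p => !pvDead pr p)).map
                        (fun p => p.2)), ?_, ?_, ?_, ?_⟩
                    · simp only [pvLoop, hs, if_pos hab]
                    · have halive2 : pvDead pr (cs, b) = false := by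
                        rw [← hab.1]; exact halive
                      rw [show ((a : Int), (b : Int)) = (cs, b) by rw [hab.1]]
                      simp [List.takeWhile_cons, List.filter_cons, halive2, pvMerge,
                        not_le.mpr hab.2]
                    · intro _; rfl
                    · exact Or.inl ⟨b, t, by rw [hab.1]⟩
                  · by_cases ha : a = cs
                    · have hbc : c0 ≤ b := by
                        rcases not_and_or.mp hab with h | h
                        · exact absurd ha h
                        · omega
                      refine ⟨cs, c0, pvMerge ct (b :: ((t.takeWhile
                        (fun p => p.1 == cs)).filter (fun p => !pvDead pr p)).map
                          (fun p => p.2)), ?_, ?_, ?_, ?_⟩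
                      · simp only [pvLoop, hs, if_neg hab]
                      · have halive2 : pvDead pr (cs, b) = false := by
                          rw [← ha]; exact halive
                        rw [show ((a : Int), (b : Int)) = (cs, b) by rw [ha]]
                        simp [List.takeWhile_cons, List.filter_cons, halive2, pvMerge, hbc]
                      · intro _; rfl
                      · exact Or.inl ⟨b, t, by rw [ha]⟩
                    · refine ⟨cs, c0, ct, ?_, ?_, ?_, ?_⟩
                      · simp only [pvLoop, hs, if_neg hab]
                      · simp [List.takeWhile_cons, ha, pvMerge]
                      · intro _; rfl
                      · refine Or.inr ⟨?_, by simp⟩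
                        simp [List.takeWhile_cons, ha]
        obtain ⟨left, e0, Mt, hB, hM, hcseq, hor⟩ := hstep
        rw [hB]
        exact step_core fb fa suffix carry cs left e0 Mt pr l
          ((pvSkipDead pr suffix).dropWhile (fun p => p.1 == left))
          ((((pvSkipDead pr suffix).takeWhile (fun p => p.1 == left)).filter
            (fun p => !pvDead pr p)).map (fun p => p.2)) _
          hpw hcarry hI3 hI4 hI6 hI3b hI5 hperm hl rfl rfl hM hcseq hor rfl hfb hfa ih

-- ===== VERDICT (by name: the statement is the Claim_ definition above) =====
theorem get_minimal_covering_intervals_spec : Claim_equal_get_minimal_covering_intervals := by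
  intro intervals _
  unfold Spec_get_minimal_covering_intervals
  unfold get_minimal_covering_intervals get_minimal_covering_intervals_alt
  have hfil : (intervals.mergeSort pvLexLe).filter (fun p => !pvDead none p) =
      intervals.mergeSort pvLexLe :=
    List.filter_eq_self.mpr (fun a _ => rfl)
  have hmu : pvFuel intervals = pvMu intervals + 1 := rfl
  apply main_sim (pvFuel intervals) (intervals.mergeSort pvLexLe) [] 0 none
    (pvFuel intervals) intervals
  · exact sort_pairwise intervals
  · exact List.Pairwise.nil
  · intro r hr; exact absurd hr (by simp)
  · intro r hr; exact absurd hr (by simp)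
  · intro r hr; exact absurd hr (by simp)
  · intro _; rfl
  · intro h; exact absurd rfl h
  · rw [List.map_nil, List.nil_append, hfil]
    exact (intervals.mergeSort_perm pvLexLe).symm
  · rw [hmu]
  · rw [hmu]
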